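-- pv_equiv track=rewrite | github.com/Pavan-12356/Letsupgrade-python-essentials | Assignment5.py | check
-- ===== SOURCE A (Python) =====
-- def check(a):
--     subList = [1,1,5]
--     for i in a:
--         for j in subList:
--             if(len(subList)>=0 and j == i):
--                 subList.pop(0)
--             else:
--                 break
--
--     if len(subList)==0:
--         return "It's a match"
--     else:
--         return "It's gone"
-- ===== SOURCE B (Python) =====
-- def check(a):
--     pattern = [1, 1, 5]
--     idx = 0
--     for x in a:
--         if idx < len(pattern) and x == pattern[idx]:
--             idx += 1
--     if idx == len(pattern):
--         return "It's a match"
--     else: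
--         return "It's gone"
-- ===== Notes on version B (the rewrite author's own statement) =====
-- stated objective: simpler
-- what changed: Replaced the nested loop that mutates (pops from) the pattern list while iterating over it with a single pass advancing an integer index into the fixed pattern [1,1,5] (a plain in-order subsequence match).
import Mathlib
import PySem

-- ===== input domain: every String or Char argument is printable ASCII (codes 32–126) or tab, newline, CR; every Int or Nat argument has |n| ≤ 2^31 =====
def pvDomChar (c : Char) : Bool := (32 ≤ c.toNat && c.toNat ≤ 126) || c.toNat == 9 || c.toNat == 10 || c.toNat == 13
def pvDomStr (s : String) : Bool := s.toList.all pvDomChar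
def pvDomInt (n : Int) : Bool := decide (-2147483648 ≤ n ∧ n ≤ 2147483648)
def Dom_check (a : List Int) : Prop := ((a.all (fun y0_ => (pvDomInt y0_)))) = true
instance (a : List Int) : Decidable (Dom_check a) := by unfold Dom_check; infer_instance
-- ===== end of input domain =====

-- B replaces A's nested loop that pops from the pattern list while iterating over it by a
-- single pass advancing an index into the fixed pattern [1,1,5] (objective: simpler).

-- ===== PORT A =====
-- Python's `for j in subList` iterates by index over the LIVE list while `pop(0)` shrinks it:
-- at position k, stop if k is out of range; otherwise j = subList[k]; if the (always true)
-- `len >= 0` guard and j == i hold, pop the head and advance k, else break.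
def checkInner (i : Int) (s : List Int) (k : Nat) : List Int :=
  if hk : k < s.length then
    let j := s[k]
    if s.length ≥ 0 ∧ j = i then
      checkInner i s.tail (k + 1)
    else
      s
  else
    s
termination_by s.length - k
decreasing_by simp only [List.length_tail]; omega


def check (a : List Int) : String :=
  let subList : List Int := [1, 1, 5]
  let final := a.foldl (fun s i => checkInner i s 0) subList
  if final.length = 0 then "It's a match" else "It's gone"

-- ===== PORT B =====
def check_alt (a : List Int) : String :=
  let pattern : List Int := [1, 1, 5]
  let idx := a.foldl (fun (idx : Nat) x =>
    if idx < pattern.length ∧ x = pattern.getD idx 0 then idx + 1 else idx) 0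
  if idx = pattern.length then "It's a match" else "It's gone"

-- ===== PRECONDITION & SPEC =====
def Spec_check (a : List Int) (out : String) : Prop := out = check_alt a
instance (a : List Int) (out : String) : Decidable (Spec_check a out) := by unfold Spec_check; infer_instance

-- ===== CLAIM (what is proved, stated in full; the proofs are below) =====
def Claim_equal_check : Prop := ∀ (a : List Int), Dom_check a → Spec_check a (check a)

-- ===== LEMMAS AND PROOFS =====

-- B's per-element step, named for the proofs.
def stepB (idx : Nat) (x : Int) : Nat :=
  if idx < ([1, 1, 5] : List Int).length ∧ x = ([1, 1, 5] : List Int).getD idx 0 then idx + 1 else idx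

-- One outer iteration of A, started on the suffix of the pattern at position idx,
-- lands on the suffix at B's advanced position: A never pops twice for one element,
-- because right after a pop the next inspected entry can never equal i again
-- (the pattern [1,1,5] has no stretch where that happens).
theorem checkInner_drop (i : Int) (idx : Nat) (h : idx ≤ 3) :
    checkInner i (List.drop idx [1, 1, 5]) 0 = List.drop (stepB idx i) [1, 1, 5] := by
  interval_cases idx
  · -- [1,1,5]
    by_cases h1 : i = 1
    · subst h1
      rw [checkInner, checkInner]
      simp [stepB]
    · rw [checkInner]
      simp [stepB, h1, Ne.symm h1]
  · -- [1,5]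
    by_cases h1 : i = 1
    · subst h1
      rw [checkInner, checkInner]
      simp [stepB]
    · rw [checkInner]
      simp [stepB, h1, Ne.symm h1]
  · -- [5]
    by_cases h5 : i = 5
    · subst h5
      rw [checkInner, checkInner]
      simp [stepB]
    · rw [checkInner]
      simp [stepB, h5, Ne.symm h5]
  · -- []
    rw [checkInner]
    simp [stepB]

theorem stepB_le (idx : Nat) (x : Int) (h : idx ≤ 3) : stepB idx x ≤ 3 := by
  unfold stepB
  split <;> simp_all

theorem fold_invariant (a : List Int) (idx : Nat) (h : idx ≤ 3) :
    a.foldl (fun s i => checkInner i s 0) (List.drop idx [1, 1, 5]) =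
      List.drop (a.foldl stepB idx) [1, 1, 5] ∧ a.foldl stepB idx ≤ 3 := by
  induction a generalizing idx with
  | nil => exact ⟨rfl, h⟩
  | cons x xs ih =>
    simp only [List.foldl_cons]
    rw [checkInner_drop x idx h]
    exact ih (stepB idx x) (stepB_le idx x h)

-- ===== VERDICT (by name: the statement is the Claim_ definition above) =====
theorem check_spec : Claim_equal_check := by
  intro a _
  unfold Spec_check check check_alt
  simp only []
  have h := fold_invariant a 0 (by omega)
  simp only [List.drop_zero] at h
  rw [h.1]
  have hle := h.2
  have : (a.foldl (fun (idx : Nat) x =>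
      if idx < ([1,1,5] : List Int).length ∧ x = ([1,1,5] : List Int).getD idx 0 then idx + 1 else idx) 0)
      = a.foldl stepB 0 := by rfl
  rw [this]
  rcases Nat.lt_or_ge (a.foldl stepB 0) 3 with hlt | hge
  · interval_cases h3 : a.foldl stepB 0 <;> simp
  · have : a.foldl stepB 0 = 3 := le_antisymm hle hge
    simp [this]
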